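-- pv_equiv track=rewrite | github.com/parallelno/guimos_jdundel | scripts/utils/common_gfx.py | plane_indexes_to_bit_lists
-- ===== SOURCE A (Python) =====
-- color_index_to_bit = [
-- 		(0,0,0,0), # color_idx = 0
-- 		(0,0,0,1),
-- 		(0,0,1,0), # color_idx = 2
-- 		(0,0,1,1),
-- 		(0,1,0,0), # color_idx = 4
-- 		(0,1,0,1),
-- 		(0,1,1,0),
-- 		(0,1,1,1),
-- 		(1,0,0,0), # color_idx = 8
-- 		(1,0,0,1),
-- 		(1,0,1,0),
-- 		(1,0,1,1),
-- 		(1,1,0,0),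
-- 		(1,1,0,1),
-- 		(1,1,1,0),
-- 		(1,1,1,1),
-- 	]
--
-- def plane_indexes_to_bit_lists(tile_img):
-- 	bits0 = [] # 8000-9FFF # from left to right, from bottom to top
-- 	bits1 = [] # A000-BFFF
-- 	bits2 = [] # C000-DFFF
-- 	bits3 = [] # E000-FFFF
-- 	for color_idx in tile_img:
-- 		bit0, bit1, bit2, bit3 = color_index_to_bit[color_idx]
-- 		bits0.append(bit0)
-- 		bits1.append(bit1)
-- 		bits2.append(bit2)
-- 		bits3.append(bit3)
-- 	return bits0, bits1, bits2, bits3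
-- ===== SOURCE B (Python) =====
-- def plane_indexes_to_bit_lists(tile_img):
--     # no lookup table: each plane bit is computed arithmetically from the
--     # color index modulo 16 (Python % floors, so -16..-1 behave like 0..15,
--     # matching the table's negative-index wraparound)
--     return ([(idx % 16) // 8 % 2 for idx in tile_img],
--             [(idx % 16) // 4 % 2 for idx in tile_img],
--             [(idx % 16) // 2 % 2 for idx in tile_img],
--             [idx % 2 for idx in tile_img])
-- ===== Notes on version B (the rewrite author's own statement) =====
-- stated objective: alternative
-- what changed: Replaces A's table lookup with fused appends by direct bit arithmetic: four independent comprehensions compute each plane bit as (idx % 16) // 2^k % 2, with no lookup table at all; Pre_ excludes indexes outside -16..15, on which A raises IndexError.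
import Mathlib
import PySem

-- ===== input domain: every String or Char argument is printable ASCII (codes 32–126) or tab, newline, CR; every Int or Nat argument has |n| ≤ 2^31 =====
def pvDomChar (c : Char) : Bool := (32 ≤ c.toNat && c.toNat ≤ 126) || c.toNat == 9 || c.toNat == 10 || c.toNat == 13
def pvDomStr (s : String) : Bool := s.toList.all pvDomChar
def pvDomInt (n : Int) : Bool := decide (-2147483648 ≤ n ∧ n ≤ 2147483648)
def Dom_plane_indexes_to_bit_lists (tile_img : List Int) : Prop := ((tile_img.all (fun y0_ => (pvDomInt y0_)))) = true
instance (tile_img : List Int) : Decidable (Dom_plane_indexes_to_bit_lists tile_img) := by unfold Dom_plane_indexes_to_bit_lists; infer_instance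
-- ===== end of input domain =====

-- ===== PORT A =====
-- B replaces A's table lookup + fused appending loop by direct bit arithmetic
-- (four independent passes, no table); equivalence about return values only.
def pvColorIndexToBit : List (Int × Int × Int × Int) :=
  [(0,0,0,0),(0,0,0,1),(0,0,1,0),(0,0,1,1),
   (0,1,0,0),(0,1,0,1),(0,1,1,0),(0,1,1,1),
   (1,0,0,0),(1,0,0,1),(1,0,1,0),(1,0,1,1),
   (1,1,0,0),(1,1,0,1),(1,1,1,0),(1,1,1,1)]

-- color_index_to_bit[color_idx]; Python raises IndexError outside -16..15 (excluded
-- by Pre_), so the .getD default is never reached on admitted inputs.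
def pvLookup (idx : Int) : Int × Int × Int × Int :=
  (PySem.List.pyGet? pvColorIndexToBit idx).getD (0,0,0,0)

def plane_indexes_to_bit_lists (tile_img : List Int) : List Int × List Int × List Int × List Int :=
  tile_img.foldl
    (fun acc color_idx =>
      let b := pvLookup color_idx
      (acc.1 ++ [b.1], acc.2.1 ++ [b.2.1], acc.2.2.1 ++ [b.2.2.1], acc.2.2.2 ++ [b.2.2.2]))
    ([], [], [], [])

-- ===== PORT B =====
def plane_indexes_to_bit_lists_alt (tile_img : List Int) : List Int × List Int × List Int × List Int :=
  (tile_img.map (fun idx => PySem.Int.mod (PySem.Int.floordiv (PySem.Int.mod idx 16) 8) 2),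
   tile_img.map (fun idx => PySem.Int.mod (PySem.Int.floordiv (PySem.Int.mod idx 16) 4) 2),
   tile_img.map (fun idx => PySem.Int.mod (PySem.Int.floordiv (PySem.Int.mod idx 16) 2) 2),
   tile_img.map (fun idx => PySem.Int.mod idx 2))

-- ===== PRECONDITION & SPEC =====
-- Pre_ excludes exactly the inputs on which A raises IndexError: an element outside -16..15.
def Pre_plane_indexes_to_bit_lists (tile_img : List Int) : Prop :=
  ∀ x ∈ tile_img, PySem.Raise.InRange 16 x
instance (tile_img : List Int) : Decidable (Pre_plane_indexes_to_bit_lists tile_img) := by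
  unfold Pre_plane_indexes_to_bit_lists; infer_instance

def pvWitness_plane_indexes_to_bit_lists : List Int := [0, 5, 15, -1, -16]

def Spec_plane_indexes_to_bit_lists (tile_img : List Int) (out : List Int × List Int × List Int × List Int) : Prop := out = plane_indexes_to_bit_lists_alt tile_img
instance (tile_img : List Int) (out : List Int × List Int × List Int × List Int) : Decidable (Spec_plane_indexes_to_bit_lists tile_img out) := by unfold Spec_plane_indexes_to_bit_lists; infer_instance

-- ===== CLAIM =====
def Claim_equal_plane_indexes_to_bit_lists : Prop := ∀ (tile_img : List Int), Dom_plane_indexes_to_bit_lists tile_img → Pre_plane_indexes_to_bit_lists tile_img → Spec_plane_indexes_to_bit_lists tile_img (plane_indexes_to_bit_lists tile_img)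


-- ===== LEMMAS AND PROOFS =====
theorem pv_witness_ok :
    Dom_plane_indexes_to_bit_lists pvWitness_plane_indexes_to_bit_lists ∧
    Pre_plane_indexes_to_bit_lists pvWitness_plane_indexes_to_bit_lists := by decide

-- for an in-range index, the table row is exactly the four arithmetic plane bits
theorem pv_lookup_bits (x : Int) (h : PySem.Raise.InRange 16 x) :
    pvLookup x =
      (PySem.Int.mod (PySem.Int.floordiv (PySem.Int.mod x 16) 8) 2,
       PySem.Int.mod (PySem.Int.floordiv (PySem.Int.mod x 16) 4) 2,
       PySem.Int.mod (PySem.Int.floordiv (PySem.Int.mod x 16) 2) 2,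
       PySem.Int.mod x 2) := by
  have hlo : (-16 : Int) ≤ x := by
    simpa [PySem.Raise.InRange] using h.1
  have hhi : x < 16 := by
    simpa [PySem.Raise.InRange] using h.2
  interval_cases x <;> decide

-- A's fold with four back-appends equals four column maps of the table lookup
theorem pv_fold_columns (xs : List Int) (a b c d : List Int) :
    xs.foldl
      (fun acc color_idx =>
        let r := pvLookup color_idx
        (acc.1 ++ [r.1], acc.2.1 ++ [r.2.1], acc.2.2.1 ++ [r.2.2.1], acc.2.2.2 ++ [r.2.2.2]))
      (a, b, c, d)
    = (a ++ xs.map (fun x => (pvLookup x).1),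
       b ++ xs.map (fun x => (pvLookup x).2.1),
       c ++ xs.map (fun x => (pvLookup x).2.2.1),
       d ++ xs.map (fun x => (pvLookup x).2.2.2)) := by
  induction xs generalizing a b c d with
  | nil => simp
  | cons x xs ih => simp [List.foldl, ih]

-- ===== VERDICT =====
theorem plane_indexes_to_bit_lists_spec : Claim_equal_plane_indexes_to_bit_lists := by
  intro tile_img _ hpre
  unfold Spec_plane_indexes_to_bit_lists plane_indexes_to_bit_lists plane_indexes_to_bit_lists_alt
  rw [pv_fold_columns tile_img [] [] [] []]
  simp only [List.nil_append]
  refine Prod.ext ?_ (Prod.ext ?_ (Prod.ext ?_ ?_)) <;>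
    exact List.map_congr_left (fun x hx => by rw [pv_lookup_bits x (hpre x hx)])
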